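-- pv_equiv track=rewrite | github.com/zerynth/z3tester | ztool/dist/ztc/devices/discover.py | compare_dbs
-- ===== SOURCE A (Python) =====
-- def compare_dbs(new_db, old_db):
--     if new_db.keys()!=old_db.keys():
--         return False
--     else:
--         for k,v in old_db.items():
--             if new_db[k]["fingerprint"]!=v["fingerprint"]:
--                 return False
--     return True
-- ===== SOURCE B (Python) =====
-- def compare_dbs(new_db, old_db):
--     if new_db.keys() != old_db.keys():
--         return False
--     ks = sorted(new_db)
--     return [new_db[k]["fingerprint"] for k in ks] == \
--            [old_db[k]["fingerprint"] for k in ks]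
-- ===== Notes on version B (the rewrite author's own statement) =====
-- stated objective: alternative
-- what changed: Instead of scanning old_db item by item with a per-key hash lookup and an early return, B canonicalises once by sorting the common key set and compares the two fingerprint sequences in that canonical order with a single list ==.
import Mathlib
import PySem

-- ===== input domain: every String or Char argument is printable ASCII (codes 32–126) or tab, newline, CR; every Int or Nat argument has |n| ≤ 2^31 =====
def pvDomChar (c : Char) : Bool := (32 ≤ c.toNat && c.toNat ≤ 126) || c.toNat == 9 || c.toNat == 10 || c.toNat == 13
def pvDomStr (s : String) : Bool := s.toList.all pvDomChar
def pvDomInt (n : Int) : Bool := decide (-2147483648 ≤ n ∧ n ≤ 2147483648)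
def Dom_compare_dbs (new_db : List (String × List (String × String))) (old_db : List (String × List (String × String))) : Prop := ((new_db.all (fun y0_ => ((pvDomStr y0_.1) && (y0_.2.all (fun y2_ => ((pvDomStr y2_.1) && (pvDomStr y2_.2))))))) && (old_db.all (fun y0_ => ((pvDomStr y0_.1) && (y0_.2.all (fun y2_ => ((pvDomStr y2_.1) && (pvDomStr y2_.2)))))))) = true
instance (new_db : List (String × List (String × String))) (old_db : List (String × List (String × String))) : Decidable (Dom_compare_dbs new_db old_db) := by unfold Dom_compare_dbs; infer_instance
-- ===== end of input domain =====

-- B replaces A's item-by-item scan (per-key hash lookup, early return) by sorting the common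
-- key set once and comparing the two fingerprint sequences in that canonical order with one ==.

-- the Python dicts the assoc-list arguments denote (duplicates overwrite, Python dict construction)
def pvToDict (db : List (String × List (String × String))) :
    PySem.Dict String (PySem.Dict String String) :=
  PySem.Dict.ofList (db.map (fun p => (p.1, PySem.Dict.ofList p.2)))

-- v["fingerprint"]: exact whenever "fingerprint" is a key of v (guaranteed by Pre_ where reached)
def pvFp (v : PySem.Dict String String) : String := v.getD "fingerprint" ""

-- ===== PORT A =====
-- A's loop over old_db.items() with early return; nd[k] rendered with getD (exact when the
-- keys()-equality guard has passed, so k is a key of nd)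
def pvLoopA (nd : PySem.Dict String (PySem.Dict String String)) :
    List (String × PySem.Dict String String) → Bool
  | [] => true
  | (k, v) :: rest =>
      if pvFp (nd.getD k PySem.Dict.empty) != pvFp v then false else pvLoopA nd rest

def compare_dbs (new_db : List (String × List (String × String))) (old_db : List (String × List (String × String))) : Bool :=
  let nd := pvToDict new_db
  let od := pvToDict old_db
  if !(PySem.Set.equal nd.keys od.keys) then false
  else pvLoopA nd od.items

-- ===== PORT B =====
-- sorted(new_db) over the dict's (distinct) keys; db[k] rendered with getD, exact after the
-- guard has ensured k is a key of both dicts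
def compare_dbs_alt (new_db : List (String × List (String × String))) (old_db : List (String × List (String × String))) : Bool :=
  let nd := pvToDict new_db
  let od := pvToDict old_db
  if !(PySem.Set.equal nd.keys od.keys) then false
  else
    let ks := PySem.List.sorted nd.keys (fun k => k) false
    (ks.map (fun k => pvFp (nd.getD k PySem.Dict.empty)))
      == (ks.map (fun k => pvFp (od.getD k PySem.Dict.empty)))

-- ===== PRECONDITION & SPEC =====
-- Pre_ excludes inputs with equal key sets where some device dict lacks a "fingerprint" entry:
-- there Python A raises KeyError, or returns False only by early-returning before reaching the
-- missing entry (B raises KeyError there).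
def Pre_compare_dbs (new_db : List (String × List (String × String))) (old_db : List (String × List (String × String))) : Prop :=
  PySem.Set.equal (PySem.Set.ofList (new_db.map Prod.fst)) (PySem.Set.ofList (old_db.map Prod.fst)) = true →
    (((pvToDict new_db).values.all (fun d => d.contains "fingerprint")) &&
     ((pvToDict old_db).values.all (fun d => d.contains "fingerprint"))) = true
instance (new_db : List (String × List (String × String))) (old_db : List (String × List (String × String))) : Decidable (Pre_compare_dbs new_db old_db) := by unfold Pre_compare_dbs; infer_instance

def pvWitness_compare_dbs : (List (String × List (String × String))) × (List (String × List (String × String))) :=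
  ([("a", [("fingerprint", "x")])], [("a", [("fingerprint", "x")])])

def Spec_compare_dbs (new_db : List (String × List (String × String))) (old_db : List (String × List (String × String))) (out : Bool) : Prop := out = compare_dbs_alt new_db old_db
instance (new_db : List (String × List (String × String))) (old_db : List (String × List (String × String))) (out : Bool) : Decidable (Spec_compare_dbs new_db old_db out) := by unfold Spec_compare_dbs; infer_instance

-- ===== CLAIM (what is proved, stated in full; the proofs are below) =====
def Claim_equal_compare_dbs : Prop := ∀ (new_db : List (String × List (String × String))) (old_db : List (String × List (String × String))), Dom_compare_dbs new_db old_db → Pre_compare_dbs new_db old_db → Spec_compare_dbs new_db old_db (compare_dbs new_db old_db)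

-- ===== LEMMAS AND PROOFS =====

theorem pvLoopA_eq_all (nd : PySem.Dict String (PySem.Dict String String))
    (l : List (String × PySem.Dict String String)) :
    pvLoopA nd l = l.all (fun p => pvFp (nd.getD p.1 PySem.Dict.empty) == pvFp p.2) := by
  induction l with
  | nil => rfl
  | cons p rest ih =>
      obtain ⟨k, v⟩ := p
      simp only [pvLoopA, List.all_cons, ih, bne]
      cases h : (pvFp (nd.getD k PySem.Dict.empty) == pvFp v) with
      | false => simp
      | true => simp

theorem compare_dbs_spec_aux (new_db old_db : List (String × List (String × String))) :
    compare_dbs new_db old_db = compare_dbs_alt new_db old_db := by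
  unfold compare_dbs compare_dbs_alt
  set nd := pvToDict new_db with hnd
  set od := pvToDict old_db with hod
  cases hk : PySem.Set.equal nd.keys od.keys with
  | false => simp [hk]
  | true =>
      simp only [hk, Bool.not_true, Bool.false_eq_true, if_false]
      have hodn : od.keys.Nodup := by rw [hod]; exact PySem.Dict.nodup_keys_ofList _
      have hmem : ∀ x, x ∈ nd.keys ↔ x ∈ od.keys := (PySem.Set.equal_iff _ _).1 hk
      rw [pvLoopA_eq_all]
      rw [Bool.eq_iff_iff]
      simp only [List.all_eq_true, beq_iff_eq, List.map_inj_left, PySem.List.mem_sorted]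
      constructor
      · intro h k hkmem
        have hkod : k ∈ od.keys := (hmem k).1 hkmem
        obtain ⟨v, hv⟩ : ∃ v, od.get? k = some v := by
          rcases ho : od.get? k with _ | v
          · exact absurd ((PySem.Dict.get?_eq_none_iff_not_mem_keys _ _).1 ho) (by simp [hkod])
          · exact ⟨v, rfl⟩
        have hiv : (k, v) ∈ od.items := PySem.Dict.mem_items_of_get?_eq_some _ hv
        have := h (k, v) hiv
        rw [PySem.Dict.getD_eq_get?_getD od, hv]
        simpa using this
      · intro h p hp
        obtain ⟨k, v⟩ := p
        have hkod : k ∈ od.keys := PySem.Dict.mem_keys_of_mem_items _ hp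
        have hknd : k ∈ nd.keys := (hmem k).2 hkod
        have hv : od.get? k = some v := PySem.Dict.get?_of_mem_items _ hp hodn
        have := h k hknd
        rw [PySem.Dict.getD_eq_get?_getD od, hv] at this
        simpa using this

-- ===== VERDICT (by name: the statement is the Claim_ definition above) =====
theorem compare_dbs_spec : Claim_equal_compare_dbs := by
  intro new_db old_db _ _
  unfold Spec_compare_dbs
  exact compare_dbs_spec_aux new_db old_db
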